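-- pv_equiv track=rewrite | github.com/HassanHotait/perception-validation-verification | metrics_functions_from_evaluation_script.py | yolo_get_n_classes
-- ===== SOURCE A (Python) =====
-- def yolo_get_n_classes(predictions_list):
--     n_cars=0
--     n_bikes=0
--     n_pedestrians=0
--     for i in range(len(predictions_list)):
--         if predictions_list[i]=='car' or predictions_list[i]=='truck' or predictions_list[i]=='bus':
--             n_cars+=1
--         elif predictions_list[i]=='bicycle' or  predictions_list[i]=='motorbike' :
--             n_bikes+=1
--         elif predictions_list[i]=='person':
--             n_pedestrians+=1
--         else:
--             pass
--
--     n_detections=n_cars+n_bikes+n_pedestrians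
--
--     return (n_detections,n_cars,n_pedestrians,n_bikes)
-- ===== SOURCE B (Python) =====
-- def yolo_get_n_classes(predictions_list):
--     counts = {}
--     for label in predictions_list:
--         counts[label] = counts.get(label, 0) + 1
--     n_cars = counts.get('car', 0) + counts.get('truck', 0) + counts.get('bus', 0)
--     n_bikes = counts.get('bicycle', 0) + counts.get('motorbike', 0)
--     n_pedestrians = counts.get('person', 0)
--     n_detections = n_cars + n_bikes + n_pedestrians
--     return (n_detections, n_cars, n_pedestrians, n_bikes)
-- ===== Notes on version B (the rewrite author's own statement) =====
-- stated objective: idiomatic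
-- what changed: B builds a frequency dict in one pass and derives the three buckets by keyed lookups, instead of A's per-element if/elif branching with three counters.
import Mathlib
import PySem

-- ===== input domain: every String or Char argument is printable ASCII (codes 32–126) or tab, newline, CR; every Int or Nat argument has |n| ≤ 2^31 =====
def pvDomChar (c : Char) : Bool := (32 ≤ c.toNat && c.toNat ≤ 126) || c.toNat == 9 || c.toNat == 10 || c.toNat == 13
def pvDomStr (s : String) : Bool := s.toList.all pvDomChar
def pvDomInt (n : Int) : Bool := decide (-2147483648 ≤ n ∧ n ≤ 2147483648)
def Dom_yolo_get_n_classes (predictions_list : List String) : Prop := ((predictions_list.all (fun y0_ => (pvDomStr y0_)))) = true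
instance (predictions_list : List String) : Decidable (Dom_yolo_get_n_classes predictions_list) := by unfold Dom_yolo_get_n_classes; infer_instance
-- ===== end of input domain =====

-- B replaces A's per-element if/elif branching with a one-pass frequency dict plus keyed lookups (idiomatic rewrite, same cost).

-- ===== PORT A =====
-- for i in range(len(predictions_list)): if/elif chain updating (n_cars, n_bikes, n_pedestrians)
def yolo_get_n_classes (predictions_list : List String) : Int × Int × Int × Int :=
  let st :=
    (PySem.List.pyRange 0 (predictions_list.length : Int) 1).foldl
      (fun (acc : Int × Int × Int) i =>
        let x := PySem.List.pyGetD predictions_list i ""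
        if x = "car" ∨ x = "truck" ∨ x = "bus" then (acc.1 + 1, acc.2.1, acc.2.2)
        else if x = "bicycle" ∨ x = "motorbike" then (acc.1, acc.2.1 + 1, acc.2.2)
        else if x = "person" then (acc.1, acc.2.1, acc.2.2 + 1)
        else acc)
      (0, 0, 0)
  let n_detections := st.1 + st.2.1 + st.2.2
  (n_detections, st.1, st.2.2, st.2.1)

-- ===== PORT B =====
-- counts[label] = counts.get(label, 0) + 1 in one pass, then keyed lookups
def yolo_get_n_classes_alt (predictions_list : List String) : Int × Int × Int × Int :=
  let counts : PySem.Dict String Int :=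
    predictions_list.foldl (fun d x => d.insert x (d.getD x 0 + 1)) PySem.Dict.empty
  let n_cars := counts.getD "car" 0 + counts.getD "truck" 0 + counts.getD "bus" 0
  let n_bikes := counts.getD "bicycle" 0 + counts.getD "motorbike" 0
  let n_pedestrians := counts.getD "person" 0
  let n_detections := n_cars + n_bikes + n_pedestrians
  (n_detections, n_cars, n_pedestrians, n_bikes)

-- ===== PRECONDITION & SPEC =====
def Spec_yolo_get_n_classes (predictions_list : List String) (out : Int × Int × Int × Int) : Prop := out = yolo_get_n_classes_alt predictions_list
instance (predictions_list : List String) (out : Int × Int × Int × Int) : Decidable (Spec_yolo_get_n_classes predictions_list out) := by unfold Spec_yolo_get_n_classes; infer_instance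

-- ===== CLAIM (what is proved, stated in full; the proofs are below) =====
def Claim_equal_yolo_get_n_classes : Prop := ∀ (predictions_list : List String), Dom_yolo_get_n_classes predictions_list → Spec_yolo_get_n_classes predictions_list (yolo_get_n_classes predictions_list)

-- ===== LEMMAS AND PROOFS =====

-- A's loop state after consuming xs from (a, b, p) is the three bucket counts added on.
theorem yoloA_fold_counts (xs : List String) (a b p : Int) :
    xs.foldl
      (fun (acc : Int × Int × Int) x =>
        if x = "car" ∨ x = "truck" ∨ x = "bus" then (acc.1 + 1, acc.2.1, acc.2.2)
        else if x = "bicycle" ∨ x = "motorbike" then (acc.1, acc.2.1 + 1, acc.2.2)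
        else if x = "person" then (acc.1, acc.2.1, acc.2.2 + 1)
        else acc)
      (a, b, p)
    = (a + xs.count "car" + xs.count "truck" + xs.count "bus",
       b + xs.count "bicycle" + xs.count "motorbike",
       p + xs.count "person") := by
  induction xs generalizing a b p with
  | nil => simp
  | cons x xs ih =>
    simp only [List.foldl_cons, List.count_cons]
    by_cases h1 : x = "car" ∨ x = "truck" ∨ x = "bus"
    · rw [if_pos h1, ih]
      rcases h1 with h | h | h <;> subst h <;> simp <;> try ring
    · rw [if_neg h1]
      push_neg at h1
      by_cases h2 : x = "bicycle" ∨ x = "motorbike"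
      · rw [if_pos h2, ih]
        rcases h2 with h | h <;> subst h <;>
          simp [h1.1, h1.2.1, h1.2.2] <;> try ring
      · rw [if_neg h2]
        push_neg at h2
        by_cases h3 : x = "person"
        · subst h3
          rw [if_pos rfl, ih]
          simp [h2.1, h2.2]
          try ring
        · rw [if_neg h3, ih]
          simp [h1.1, h1.2.1, h1.2.2, h2.1, h2.2, h3]

-- ===== VERDICT (by name: the statement is the Claim_ definition above) =====
theorem yolo_get_n_classes_spec : Claim_equal_yolo_get_n_classes := by
  intro xs _
  unfold Spec_yolo_get_n_classes yolo_get_n_classes yolo_get_n_classes_alt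
  rw [PySem.List.foldl_pyRange_zero_pyGetD' xs ""
        (fun (acc : Int × Int × Int) x =>
          if x = "car" ∨ x = "truck" ∨ x = "bus" then (acc.1 + 1, acc.2.1, acc.2.2)
          else if x = "bicycle" ∨ x = "motorbike" then (acc.1, acc.2.1 + 1, acc.2.2)
          else if x = "person" then (acc.1, acc.2.1, acc.2.2 + 1)
          else acc)
        (0, 0, 0)]
  rw [yoloA_fold_counts]
  simp [PySem.Dict.getD_foldl_insert_add_one]
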